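-- pv_equiv track=rewrite | github.com/lliaolia94-wq/astropsychology-app | services/synastry_service.py | _generate_synastry_summary
-- ===== SOURCE A (Python) =====
-- from typing import Dict, List
--
-- def _generate_synastry_summary(aspects: List[Dict]) -> str:
--     """Генерация сводки по синастрии"""
--     if not aspects:
--         return "Минимальные аспекты взаимодействия"
--
--     harmony_aspects = [a for a in aspects if a['aspect'] in ['sextile', 'trine']]
--     challenge_aspects = [a for a in aspects if a['aspect'] in ['square', 'opposition']]
--
--     summary = f"Всего аспектов: {len(aspects)} "
--     summary += f"(гармоничные: {len(harmony_aspects)}, напряженные: {len(challenge_aspects)})"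
--
--     return summary
-- ===== SOURCE B (Python) =====
-- from typing import Dict, List
--
-- # Each aspect name is classified once by a static table into a
-- # (harmony, challenge) increment vector; one pass sums the vectors.
-- _WEIGHTS = {'sextile': (1, 0), 'trine': (1, 0), 'square': (0, 1), 'opposition': (0, 1)}
--
-- def _generate_synastry_summary(aspects: List[Dict]) -> str:
--     """Генерация сводки по синастрии"""
--     if not aspects:
--         return "Минимальные аспекты взаимодействия"
--
--     harmony = 0
--     challenge = 0
--     for a in aspects:
--         h, c = _WEIGHTS.get(a['aspect'], (0, 0))
--         harmony += h
--         challenge += c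
--
--     return (f"Всего аспектов: {len(aspects)} "
--             f"(гармоничные: {harmony}, напряженные: {challenge})")
-- ===== Notes on version B (the rewrite author's own statement) =====
-- stated objective: alternative
-- what changed: B replaces A's two filtered list comprehensions with a table-driven single pass: a static weight table maps each aspect name to a (harmony, challenge) increment vector and one loop sums those vectors into a pair accumulator.
import Mathlib
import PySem

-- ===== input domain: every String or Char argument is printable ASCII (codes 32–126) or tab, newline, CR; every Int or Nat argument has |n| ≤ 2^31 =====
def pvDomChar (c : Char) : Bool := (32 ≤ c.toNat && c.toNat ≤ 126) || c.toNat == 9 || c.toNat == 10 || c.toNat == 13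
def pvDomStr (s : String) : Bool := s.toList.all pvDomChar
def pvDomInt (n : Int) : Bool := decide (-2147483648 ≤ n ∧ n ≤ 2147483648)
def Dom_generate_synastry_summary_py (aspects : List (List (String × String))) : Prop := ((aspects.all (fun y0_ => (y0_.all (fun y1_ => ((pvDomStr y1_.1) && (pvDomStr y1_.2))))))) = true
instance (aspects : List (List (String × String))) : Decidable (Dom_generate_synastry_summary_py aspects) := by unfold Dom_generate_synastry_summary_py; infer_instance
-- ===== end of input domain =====

-- B replaces A's two filtered scans with a table-driven single pass summing
-- (harmony, challenge) increment vectors; return value only, no mutation.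

-- a['aspect'] on the association-list dict: first match (exact under Pre_, which
-- guarantees the key is present, so the "" default is never reached).
def pyAspect (a : List (String × String)) : String :=
  (((a.find? (fun p => p.1 == "aspect")).map Prod.snd).getD "")

-- ===== PORT A =====
def generate_synastry_summary_py (aspects : List (List (String × String))) : String :=
  if aspects.isEmpty then "Минимальные аспекты взаимодействия"
  else
    let harmony_aspects := aspects.filter (fun a => pyAspect a == "sextile" || pyAspect a == "trine")
    let challenge_aspects := aspects.filter (fun a => pyAspect a == "square" || pyAspect a == "opposition")
    let summary := "Всего аспектов: " ++ PySem.Int.toStr (aspects.length : Int) ++ " "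
    let summary := summary ++ "(гармоничные: " ++ PySem.Int.toStr (harmony_aspects.length : Int)
      ++ ", напряженные: " ++ PySem.Int.toStr (challenge_aspects.length : Int) ++ ")"
    summary

-- ===== PORT B =====
-- _WEIGHTS.get(k, (0, 0)): the literal dict has four distinct keys, so lookup is
-- exactly this first-match chain.
def pvWeights (k : String) : Int × Int :=
  if k == "sextile" then (1, 0)
  else if k == "trine" then (1, 0)
  else if k == "square" then (0, 1)
  else if k == "opposition" then (0, 1)
  else (0, 0)

def generate_synastry_summary_py_alt (aspects : List (List (String × String))) : String :=
  if aspects.isEmpty then "Минимальные аспекты взаимодействия"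
  else
    let hc := aspects.foldl
      (fun p a => let w := pvWeights (pyAspect a); (p.1 + w.1, p.2 + w.2)) ((0 : Int), (0 : Int))
    "Всего аспектов: " ++ PySem.Int.toStr (aspects.length : Int)
      ++ " (гармоничные: " ++ PySem.Int.toStr hc.1
      ++ ", напряженные: " ++ PySem.Int.toStr hc.2 ++ ")"

-- ===== PRECONDITION & SPEC =====
-- Pre_: every entry has the key 'aspect' (otherwise the Python A raises KeyError).
def Pre_generate_synastry_summary_py (aspects : List (List (String × String))) : Prop :=
  aspects.all (fun a => (a.find? (fun p => p.1 == "aspect")).isSome) = true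
instance (aspects : List (List (String × String))) : Decidable (Pre_generate_synastry_summary_py aspects) := by unfold Pre_generate_synastry_summary_py; infer_instance
def pvWitness_generate_synastry_summary_py : (List (List (String × String))) :=
  [[("aspect", "trine")], [("aspect", "square"), ("orb", "2")]]
def Spec_generate_synastry_summary_py (aspects : List (List (String × String))) (out : String) : Prop := out = generate_synastry_summary_py_alt aspects
instance (aspects : List (List (String × String))) (out : String) : Decidable (Spec_generate_synastry_summary_py aspects out) := by unfold Spec_generate_synastry_summary_py; infer_instance

-- ===== CLAIM =====
def Claim_equal_generate_synastry_summary_py : Prop := ∀ (aspects : List (List (String × String))), Dom_generate_synastry_summary_py aspects → Pre_generate_synastry_summary_py aspects → Spec_generate_synastry_summary_py aspects (generate_synastry_summary_py aspects)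

-- ===== LEMMAS AND PROOFS =====

-- B's vector-sum fold computes exactly A's two filter lengths.
theorem fold_weights_eq (l : List (List (String × String))) (h0 c0 : Int) :
    l.foldl (fun p a => let w := pvWeights (pyAspect a); (p.1 + w.1, p.2 + w.2)) (h0, c0)
      = (h0 + ((l.filter (fun a => pyAspect a == "sextile" || pyAspect a == "trine")).length : Int),
         c0 + ((l.filter (fun a => pyAspect a == "square" || pyAspect a == "opposition")).length : Int)) := by
  induction l generalizing h0 c0 with
  | nil => simp
  | cons x xs ih =>
    simp only [List.foldl_cons, List.filter_cons, ih]
    by_cases h1 : pyAspect x = "sextile"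
    · simp [pvWeights, h1]; omega
    · by_cases h2 : pyAspect x = "trine"
      · simp [pvWeights, h2]; omega
      · by_cases h3 : pyAspect x = "square"
        · simp [pvWeights, h3]; omega
        · by_cases h4 : pyAspect x = "opposition"
          · simp [pvWeights, h4]; omega
          · simp [pvWeights, h1, h2, h3, h4]

-- ===== VERDICT =====
theorem generate_synastry_summary_py_spec : Claim_equal_generate_synastry_summary_py := by
  intro aspects _ _
  unfold Spec_generate_synastry_summary_py generate_synastry_summary_py generate_synastry_summary_py_alt
  by_cases he : aspects.isEmpty
  · simp [he]
  · simp only [he, fold_weights_eq, Int.zero_add]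
    simp [String.append_assoc]
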